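-- pv_equiv track=rewrite | github.com/AJEPH2020/COL215P | sw ass3/hello.py | gray_tb
-- ===== SOURCE A (Python) =====
-- def gray_tb(s):
--     s2=""
--     i=0
--
--     while(i<len(s)):
--         if(i+1<len(s) and s[i+1]=="'"):
--                 s2=s2+"0"
--                 i=i+2
--                 continue
--         else:
--           s2=s2+"1"
--
--         i=i+1
--     return s2
-- ===== SOURCE B (Python) =====
-- import re
--
-- def gray_tb(s):
--     tokens = re.findall(r".'?", s, re.DOTALL)
--     return "".join("0" if len(t) == 2 else "1" for t in tokens)
-- ===== Notes on version B (the rewrite author's own statement) =====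
-- stated objective: idiomatic
-- what changed: Replaced the manual index-advancing while loop with a two-stage pass: regex tokenization re.findall(r".'?", s, re.DOTALL) groups each character with an optional following prime, then each token is mapped to '0' (length 2) or '1' and joined.
import Mathlib
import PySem

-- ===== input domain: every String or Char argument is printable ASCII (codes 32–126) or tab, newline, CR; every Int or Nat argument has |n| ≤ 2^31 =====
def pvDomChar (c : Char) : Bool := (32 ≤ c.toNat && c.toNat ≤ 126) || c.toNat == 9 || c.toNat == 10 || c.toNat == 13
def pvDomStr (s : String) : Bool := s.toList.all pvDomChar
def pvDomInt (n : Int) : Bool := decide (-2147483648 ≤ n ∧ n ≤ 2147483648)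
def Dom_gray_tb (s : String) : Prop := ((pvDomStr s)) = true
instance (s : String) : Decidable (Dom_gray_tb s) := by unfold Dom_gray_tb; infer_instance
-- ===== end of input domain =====

-- B re-implements A's index-advancing while loop as regex tokenization (".'?") followed by
-- a map/join over the tokens; same O(n) cost, more idiomatic two-stage structure.

-- ===== PORT A =====
-- A's while loop over index i, accumulating s2 (here a List Char, wrapped to String at the end).
def grayLoop (cs : List Char) (i : Nat) (acc : List Char) : List Char :=
  if _h : i < cs.length then
    if i + 1 < cs.length ∧ cs[i+1]! = '\'' then
      grayLoop cs (i + 2) (acc ++ ['0'])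
    else
      grayLoop cs (i + 1) (acc ++ ['1'])
  else acc
termination_by cs.length - i
decreasing_by all_goals omega

def gray_tb (s : String) : String := String.ofList (grayLoop s.toList 0 [])

-- ===== PORT B =====
-- Hand port of re.findall(r".'?", s, re.DOTALL): exact, since the regex greedily matches one
-- arbitrary character plus an optional immediately-following prime, left to right.
def pvTokens : List Char → List (List Char)
  | [] => []
  | c :: '\'' :: r => [c, '\''] :: pvTokens r
  | c :: r => [c] :: pvTokens r

def gray_tb_alt (s : String) : String :=
  String.ofList ((pvTokens s.toList).map (fun t => if t.length = 2 then '0' else '1'))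

-- ===== PRECONDITION & SPEC =====
def Spec_gray_tb (s : String) (out : String) : Prop := out = gray_tb_alt s
instance (s : String) (out : String) : Decidable (Spec_gray_tb s out) := by unfold Spec_gray_tb; infer_instance

-- ===== CLAIM (what is proved, stated in full; the proofs are below) =====
def Claim_equal_gray_tb : Prop := ∀ (s : String), Dom_gray_tb s → Spec_gray_tb s (gray_tb s)

-- ===== LEMMAS AND PROOFS =====

theorem pvTokens_cons_ne {c d : Char} (r : List Char) (h : d ≠ '\'') :
    pvTokens (c :: d :: r) = [c] :: pvTokens (d :: r) := by
  rw [pvTokens.eq_def]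
  simp [h]

theorem grayLoop_eq (n : Nat) : ∀ (cs : List Char) (i : Nat) (acc : List Char),
    cs.length - i ≤ n →
    grayLoop cs i acc = acc ++ (pvTokens (cs.drop i)).map (fun t => if t.length = 2 then '0' else '1') := by
  induction n with
  | zero =>
    intro cs i acc h
    have hge : cs.length ≤ i := by omega
    rw [grayLoop]
    simp [List.drop_eq_nil_of_le hge, Nat.not_lt.mpr hge, pvTokens]
  | succ n ih =>
    intro cs i acc h
    rw [grayLoop]
    by_cases hi : i < cs.length
    · have hdrop : cs.drop i = cs[i] :: cs.drop (i + 1) := List.drop_eq_getElem_cons hi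
      by_cases hp : i + 1 < cs.length ∧ cs[i+1]! = '\''
      · obtain ⟨h1, h2⟩ := hp
        have hdrop1 : cs.drop (i + 1) = cs[i+1] :: cs.drop (i + 2) := List.drop_eq_getElem_cons h1
        have h2' : cs[i+1] = '\'' := by rwa [getElem!_pos cs (i+1) h1] at h2
        rw [dif_pos hi, if_pos ⟨h1, h2⟩, ih cs (i + 2) (acc ++ ['0']) (by omega)]
        rw [hdrop, hdrop1, h2']
        simp [pvTokens]
      · rw [dif_pos hi, if_neg hp, ih cs (i + 1) (acc ++ ['1']) (by omega)]
        rw [hdrop]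
        by_cases h1 : i + 1 < cs.length
        · have hdrop1 : cs.drop (i + 1) = cs[i+1] :: cs.drop (i + 2) := List.drop_eq_getElem_cons h1
          have h2 : cs[i+1] ≠ '\'' := by
            intro hc
            exact hp ⟨h1, by rw [getElem!_pos cs (i+1) h1]; exact hc⟩
          rw [hdrop1, pvTokens_cons_ne _ h2, ← hdrop1]
          simp
        · have : cs.drop (i + 1) = [] := List.drop_eq_nil_of_le (by omega)
          rw [this]
          simp [pvTokens]
    · rw [dif_neg hi]
      have : cs.drop i = [] := List.drop_eq_nil_of_le (by omega)
      simp [this, pvTokens]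

-- ===== VERDICT (by name: the statement is the Claim_ definition above) =====
theorem gray_tb_spec : Claim_equal_gray_tb := by
  intro s _
  unfold Spec_gray_tb gray_tb gray_tb_alt
  rw [grayLoop_eq (s.toList.length) s.toList 0 [] (by omega)]
  simp
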